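-- pv_equiv track=rewrite | github.com/ayushohal/Cosmos_Project | final.py | is_part_label
-- ===== SOURCE A (Python) =====
-- def is_part_label(text: str) -> bool:
--     """
--     Checks if a string is a valid part label.
--     Rule: Must be alphanumeric, have both letters and digits, and be a reasonable length.
--     """
--     # Reject long, likely incorrect OCR strings
--     if len(text) > 10:
--         return False
--     # Rule 1: Must be alphanumeric (no hyphens, etc.)
--     if not text.isalnum():
--         return False
--     # Rule 2: Must contain both letters and numbers
--     has_letter = any(c.isalpha() for c in text)
--     has_digit = any(c.isdigit() for c in text)
--     return has_letter and has_digit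
-- ===== SOURCE B (Python) =====
-- def is_part_label(text: str) -> bool:
--     if len(text) > 10:
--         return False
--     if not text:
--         return False
--     has_letter = False
--     has_digit = False
--     for c in text:
--         if not c.isalnum():
--             return False
--         has_letter = has_letter or c.isalpha()
--         has_digit = has_digit or c.isdigit()
--     return has_letter and has_digit
-- ===== Notes on version B (the rewrite author's own statement) =====
-- stated objective: simpler
-- what changed: Replaces three independent scans (isalnum check plus two any() generator passes) with a single loop that rejects on the first non-alphanumeric character while accumulating has_letter/has_digit flags, with the empty string rejected explicitly.
import Mathlib
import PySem

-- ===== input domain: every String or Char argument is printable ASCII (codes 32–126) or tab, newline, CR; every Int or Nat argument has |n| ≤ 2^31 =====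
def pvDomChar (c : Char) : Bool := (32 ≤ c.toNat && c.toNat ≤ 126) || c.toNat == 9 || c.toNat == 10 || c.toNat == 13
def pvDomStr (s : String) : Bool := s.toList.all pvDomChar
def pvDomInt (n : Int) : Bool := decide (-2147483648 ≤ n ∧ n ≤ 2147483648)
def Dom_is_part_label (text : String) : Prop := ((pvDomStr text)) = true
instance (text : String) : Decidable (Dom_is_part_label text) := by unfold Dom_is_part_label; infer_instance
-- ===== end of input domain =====

-- B replaces A's three independent character scans with one early-exit loop carrying two flags (simpler, single pass).

-- ===== PORT A =====
def is_part_label (text : String) : Bool :=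
  if PySem.Str.len text > 10 then false
  else if !PySem.Str.strIsalnum text then false
  else
    let has_letter := text.toList.any (fun c => PySem.Chars.isalpha c)
    let has_digit := text.toList.any (fun c => PySem.Chars.isdigit c)
    has_letter && has_digit

-- ===== PORT B =====
def pvAltLoop : List Char → Bool → Bool → Bool
  | [], hl, hd => hl && hd
  | c :: cs, hl, hd =>
    if !PySem.Chars.isalnum c then false
    else pvAltLoop cs (hl || PySem.Chars.isalpha c) (hd || PySem.Chars.isdigit c)

def is_part_label_alt (text : String) : Bool :=
  if PySem.Str.len text > 10 then false
  else if text.toList.isEmpty then false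
  else pvAltLoop text.toList false false

-- ===== PRECONDITION & SPEC =====
def Spec_is_part_label (text : String) (out : Bool) : Prop := out = is_part_label_alt text
instance (text : String) (out : Bool) : Decidable (Spec_is_part_label text out) := by unfold Spec_is_part_label; infer_instance

-- ===== CLAIM (what is proved, stated in full; the proofs are below) =====
def Claim_equal_is_part_label : Prop := ∀ (text : String), Dom_is_part_label text → Spec_is_part_label text (is_part_label text)

-- ===== LEMMAS AND PROOFS =====

theorem pvAltLoop_eq (cs : List Char) (hl hd : Bool) :
    pvAltLoop cs hl hd =
      (cs.all (fun c => PySem.Chars.isalnum c) &&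
        ((hl || cs.any (fun c => PySem.Chars.isalpha c)) &&
         (hd || cs.any (fun c => PySem.Chars.isdigit c)))) := by
  induction cs generalizing hl hd with
  | nil => simp [pvAltLoop]
  | cons c cs ih =>
    simp only [pvAltLoop, List.all_cons, List.any_cons]
    by_cases h : PySem.Chars.isalnum c
    · simp [h, ih, Bool.or_assoc]
    · simp [h]

-- ===== VERDICT (by name: the statement is the Claim_ definition above) =====
theorem is_part_label_spec : Claim_equal_is_part_label := by
  intro text _
  unfold Spec_is_part_label is_part_label is_part_label_alt
  by_cases hlen : PySem.Str.len text > 10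
  · rw [if_pos hlen, if_pos hlen]
  · rw [if_neg hlen, if_neg hlen]
    by_cases he : text.toList = []
    · simp [PySem.Str.strIsalnum, PySem.Chars.strIsalnum, he]
    · have hne : text.toList.isEmpty = false := by simp [he]
      rw [hne, pvAltLoop_eq]
      by_cases ha : (text.toList.all fun c => PySem.Chars.isalnum c) = true
      · have hs : PySem.Str.strIsalnum text = true := by
          simp only [PySem.Str.strIsalnum, PySem.Chars.strIsalnum]
          simp [he, ha]
        rw [hs]
        simp [ha]
      · have hs : PySem.Str.strIsalnum text = false := by
          simp only [PySem.Str.strIsalnum, PySem.Chars.strIsalnum]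
          simp [ha]
        rw [hs]
        simp [eq_false_of_ne_true ha]
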